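-- pv_equiv track=rewrite | github.com/rctzeng/AlgorithmDataStructuresPractice | Leetcode/ZigZagConversion_6.py | convert
-- ===== SOURCE A (Python) =====
-- def convert(s, numRows):
--     """
--     :type s: str
--     :type numRows: int
--     :rtype: str
--     """
--     if numRows==1: return s
--     Mod_k = (numRows-1)*2
--     Rows = [[] for r in range(numRows)]
--     for i,c in enumerate(s):
--         for r in range(numRows):
--             if i%Mod_k==r or i%Mod_k==(Mod_k-r): Rows[r] += [c]
--     return ''.join([''.join(x) for x in Rows])
-- ===== SOURCE B (Python) =====
-- def convert(s, numRows):
--     if numRows == 1: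
--         return s
--     cycle = 2 * numRows - 2
--     rows = {}
--     for i, c in enumerate(s):
--         r = i % cycle
--         rows.setdefault(min(r, cycle - r), []).append(c)
--     return ''.join(''.join(rows.get(r, [])) for r in range(numRows))
-- ===== Notes on version B (the rewrite author's own statement) =====
-- stated objective: faster
-- what changed: Instead of scanning all numRows rows for every character, B computes each character's row directly as min(i % cycle, cycle - i % cycle), groups characters in a dict with one append per character, and reads the rows back in one pass over range(numRows).
import Mathlib
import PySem

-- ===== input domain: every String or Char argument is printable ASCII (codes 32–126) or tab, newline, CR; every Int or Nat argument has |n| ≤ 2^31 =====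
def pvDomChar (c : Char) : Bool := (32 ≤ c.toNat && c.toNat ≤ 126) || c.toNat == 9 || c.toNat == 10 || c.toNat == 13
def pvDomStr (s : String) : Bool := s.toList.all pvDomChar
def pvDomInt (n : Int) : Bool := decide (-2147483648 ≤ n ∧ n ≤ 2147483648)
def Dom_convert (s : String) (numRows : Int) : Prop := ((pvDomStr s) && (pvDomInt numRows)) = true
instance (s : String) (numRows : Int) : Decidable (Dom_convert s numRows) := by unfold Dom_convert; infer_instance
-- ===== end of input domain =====

-- B groups characters into a dict keyed by the directly computed zigzag row (min(i % cycle, cycle - i % cycle)),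
-- one append per character, instead of A's inner scan over all numRows rows per character (different algorithm).


-- ===== PORT A =====
def convert (s : String) (numRows : Int) : String :=
  if numRows == 1 then s
  else
    let modk := (numRows - 1) * 2
    let rows0 : List (List Char) := (PySem.List.pyRange 0 numRows 1).map (fun _ => ([] : List Char))
    let rows := (PySem.List.enumerate s.toList 0).foldl
      (fun rows ic =>
        (PySem.List.pyRange 0 numRows 1).foldl
          (fun rows r =>
            if PySem.Int.mod ic.1 modk == r || PySem.Int.mod ic.1 modk == modk - r then
              rows.set r.toNat (rows.getD r.toNat [] ++ [ic.2])
            else rows)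
          rows)
      rows0
    String.ofList rows.flatten

-- ===== PORT B =====
def convert_alt (s : String) (numRows : Int) : String :=
  if numRows == 1 then s
  else
    let cycle := 2 * numRows - 2
    -- rows.setdefault(k, []).append(c)  ==  rows[k] = rows.get(k, []) + [c]  ==  Dict.modify k [] (· ++ [c])
    let rows : PySem.Dict Int (List Char) := (PySem.List.enumerate s.toList 0).foldl
      (fun d ic =>
        let r := PySem.Int.mod ic.1 cycle
        d.modify (min r (cycle - r)) [] (· ++ [ic.2]))
      PySem.Dict.empty
    String.ofList ((PySem.List.pyRange 0 numRows 1).map (fun r => rows.getD r [])).flatten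

-- ===== PRECONDITION & SPEC =====
def Spec_convert (s : String) (numRows : Int) (out : String) : Prop := out = convert_alt s numRows
instance (s : String) (numRows : Int) (out : String) : Decidable (Spec_convert s numRows out) := by unfold Spec_convert; infer_instance

-- ===== CLAIM (what is proved, stated in full; the proofs are below) =====
def Claim_equal_convert : Prop := ∀ (s : String) (numRows : Int), Dom_convert s numRows → Spec_convert s numRows (convert s numRows)

-- ===== LEMMAS AND PROOFS =====

-- a guarded fold whose guard is false on every element does nothing
lemma foldl_if_none {α β : Type} (p : β → Bool) (f : α → β → α) (l : List β) (init : α)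
    (h : ∀ x ∈ l, p x = false) :
    l.foldl (fun a x => if p x then f a x else a) init = init := by
  induction l generalizing init with
  | nil => rfl
  | cons b l ih =>
    simp only [List.foldl_cons, h b (by simp)]
    simp only [Bool.false_eq_true, if_false]
    exact ih init (fun x hx => h x (List.mem_cons_of_mem _ hx))

-- a guarded fold whose guard holds at exactly one element of a nodup list applies f once, at that element
lemma foldl_if_single {α β : Type} (p : β → Bool) (f : α → β → α) (t : β) :
    ∀ (l : List β) (init : α), t ∈ l → l.Nodup → (∀ x ∈ l, (p x = true ↔ x = t)) →
    l.foldl (fun a x => if p x then f a x else a) init = f init t := by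
  intro l
  induction l with
  | nil => intro init hmem _ _; cases hmem
  | cons b l ih =>
    intro init hmem hnd h
    by_cases hb : b = t
    · subst hb
      simp only [List.foldl_cons, (h b (by simp)).mpr rfl, if_true]
      apply foldl_if_none
      intro x hx
      by_contra hpx
      have : x = b := (h x (List.mem_cons_of_mem _ hx)).mp (by
        cases hv : p x with
        | false => exact absurd hv hpx
        | true => rfl)
      exact (List.nodup_cons.mp hnd).1 (this ▸ hx)
    · have hpb : p b = false := by
        cases hv : p b with
        | true => exact absurd ((h b (by simp)).mp hv) hb
        | false => rfl
      simp only [List.foldl_cons, hpb, Bool.false_eq_true, if_false]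
      have hmem' : t ∈ l := by
        rcases List.mem_cons.mp hmem with h1 | h1
        · exact absurd h1.symm hb
        · exact h1
      exact ih _ hmem' (List.nodup_cons.mp hnd).2 (fun x hx => h x (List.mem_cons_of_mem _ hx))

-- A's inner scan over all rows equals a single targeted append at the directly computed row
lemma inner_scan_eq (numRows : Int) (h2 : 2 ≤ numRows) (i : Int) (c : Char)
    (rows : List (List Char)) :
    (PySem.List.pyRange 0 numRows 1).foldl
      (fun rows r =>
        if PySem.Int.mod i ((numRows - 1) * 2) == r
            || PySem.Int.mod i ((numRows - 1) * 2) == (numRows - 1) * 2 - r then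
          rows.set r.toNat (rows.getD r.toNat [] ++ [c])
        else rows)
      rows
    = rows.set (min (PySem.Int.mod i (2 * numRows - 2))
                    (2 * numRows - 2 - PySem.Int.mod i (2 * numRows - 2))).toNat
        (rows.getD (min (PySem.Int.mod i (2 * numRows - 2))
                        (2 * numRows - 2 - PySem.Int.mod i (2 * numRows - 2))).toNat [] ++ [c]) := by
  have hmk : (numRows - 1) * 2 = 2 * numRows - 2 := by ring
  rw [hmk]
  set k := 2 * numRows - 2 with hk
  have hkpos : 0 < k := by omega
  set m := PySem.Int.mod i k with hm
  have hm0 : 0 ≤ m := PySem.Int.mod_nonneg i hkpos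
  have hmlt : m < k := PySem.Int.mod_lt i hkpos
  set t := min m (k - m) with ht
  have htmem : t ∈ PySem.List.pyRange 0 numRows 1 := by
    rw [PySem.List.mem_pyRange_one]
    constructor <;> omega
  apply foldl_if_single _ _ t
  · exact htmem
  · exact PySem.List.nodup_pyRange_one 0 numRows
  · intro r hr
    rw [PySem.List.mem_pyRange_one] at hr
    simp only [Bool.or_eq_true, beq_iff_eq]
    omega

-- the targeted-set fold preserves the length of the row table
lemma fold_set_length (pairs : List (Int × Char)) :
    ∀ (rows : List (List Char)),
    (pairs.foldl (fun rows p => rows.set p.1.toNat (rows.getD p.1.toNat [] ++ [p.2])) rows).length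
      = rows.length := by
  induction pairs with
  | nil => intro rows; rfl
  | cons p pairs ih =>
    intro rows
    simp only [List.foldl_cons]
    rw [ih]
    exact List.length_set ..

-- row j of the targeted-set fold = old row j followed by the values whose key is j
lemma fold_set_getD (pairs : List (Int × Char)) :
    ∀ (rows : List (List Char)) (j : Nat),
    (∀ p ∈ pairs, 0 ≤ p.1 ∧ p.1 < (rows.length : Int)) → j < rows.length →
    (pairs.foldl (fun rows p => rows.set p.1.toNat (rows.getD p.1.toNat [] ++ [p.2])) rows).getD j []
      = rows.getD j [] ++ (pairs.filter (fun p => p.1 == (j : Int))).map (·.2) := by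
  induction pairs with
  | nil => intro rows j _ _; simp
  | cons p pairs ih =>
    intro rows j hb hj
    have hp := hb p (by simp)
    have hlen : (rows.set p.1.toNat (rows.getD p.1.toNat [] ++ [p.2])).length = rows.length :=
      List.length_set ..
    simp only [List.foldl_cons]
    rw [ih _ j (by rw [hlen]; exact fun q hq => hb q (List.mem_cons_of_mem _ hq)) (by omega)]
    by_cases hpj : p.1 = (j : Int)
    · have hnat : p.1.toNat = j := by omega
      have hset : (rows.set p.1.toNat (rows.getD p.1.toNat [] ++ [p.2])).getD j []
          = rows.getD j [] ++ [p.2] := by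
        have hin : p.1.toNat < rows.length := by omega
        rw [← hnat]
        simp [List.getD, List.getElem?_set_self', List.getElem?_eq_getElem hin]
      rw [hset]
      simp only [List.filter_cons, hpj, beq_self_eq_true, if_true, List.map_cons]
      simp
    · have hnat : p.1.toNat ≠ j := by omega
      have hset : (rows.set p.1.toNat (rows.getD p.1.toNat [] ++ [p.2])).getD j []
          = rows.getD j [] := by
        simp only [List.getD]
        rw [List.getElem?_set_ne hnat]
      rw [hset]
      have : (p.1 == (j : Int)) = false := by simp [hpj]
      simp only [List.filter_cons, this]
      simp

-- ===== VERDICT (by name: the statement is the Claim_ definition above) =====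
theorem convert_spec : Claim_equal_convert := by
  intro s numRows _hdom
  unfold Spec_convert convert convert_alt
  by_cases h1 : numRows = 1
  · simp [h1]
  · have hne : (numRows == 1) = false := by simp [h1]
    simp only [hne, Bool.false_eq_true, if_false]
    by_cases hpos : numRows ≤ 0
    · -- no rows at all: both sides produce the empty string
      rw [PySem.List.pyRange_one_eq_nil (by omega)]
      simp [List.foldl_fixed]
    · have h2 : 2 ≤ numRows := by omega
      congr 1
      congr 1
      -- turn A's inner scan into the single targeted set
      rw [PySem.List.foldl_congr_mem _ _
            (fun rows ic =>
              rows.set (min (PySem.Int.mod ic.1 (2 * numRows - 2))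
                            (2 * numRows - 2 - PySem.Int.mod ic.1 (2 * numRows - 2))).toNat
                (rows.getD (min (PySem.Int.mod ic.1 (2 * numRows - 2))
                                (2 * numRows - 2 - PySem.Int.mod ic.1 (2 * numRows - 2))).toNat []
                  ++ [ic.2]))
            _ (fun rows ic _ => inner_scan_eq numRows h2 ic.1 ic.2 rows)]
      -- view both loops as loops over (row-key, char) pairs
      set pairs : List (Int × Char) := (PySem.List.enumerate s.toList 0).map
        (fun ic => (min (PySem.Int.mod ic.1 (2 * numRows - 2))
                        (2 * numRows - 2 - PySem.Int.mod ic.1 (2 * numRows - 2)), ic.2)) with hpairs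
      rw [show (PySem.List.enumerate s.toList 0).foldl
            (fun rows ic =>
              rows.set (min (PySem.Int.mod ic.1 (2 * numRows - 2))
                            (2 * numRows - 2 - PySem.Int.mod ic.1 (2 * numRows - 2))).toNat
                (rows.getD (min (PySem.Int.mod ic.1 (2 * numRows - 2))
                                (2 * numRows - 2 - PySem.Int.mod ic.1 (2 * numRows - 2))).toNat []
                  ++ [ic.2]))
            ((PySem.List.pyRange 0 numRows 1).map (fun _ => ([] : List Char)))
          = pairs.foldl (fun rows p => rows.set p.1.toNat (rows.getD p.1.toNat [] ++ [p.2]))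
              ((PySem.List.pyRange 0 numRows 1).map (fun _ => ([] : List Char))) from
          (List.foldl_map
            (f := fun ic : Int × Char =>
              ((min (PySem.Int.mod ic.1 (2 * numRows - 2))
                    (2 * numRows - 2 - PySem.Int.mod ic.1 (2 * numRows - 2)), ic.2) : Int × Char))
            (g := fun (rows : List (List Char)) (p : Int × Char) =>
              rows.set p.1.toNat (rows.getD p.1.toNat [] ++ [p.2]))).symm,
        show (PySem.List.enumerate s.toList 0).foldl
            (fun d ic =>
              d.modify (min (PySem.Int.mod ic.1 (2 * numRows - 2))
                            (2 * numRows - 2 - PySem.Int.mod ic.1 (2 * numRows - 2))) []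
                (· ++ [ic.2]))
            PySem.Dict.empty
          = pairs.foldl (fun d p => d.modify p.1 [] (· ++ [p.2])) PySem.Dict.empty from
          (List.foldl_map
            (f := fun ic : Int × Char =>
              ((min (PySem.Int.mod ic.1 (2 * numRows - 2))
                    (2 * numRows - 2 - PySem.Int.mod ic.1 (2 * numRows - 2)), ic.2) : Int × Char))
            (g := fun (d : PySem.Dict Int (List Char)) (p : Int × Char) =>
              d.modify p.1 [] (· ++ [p.2]))).symm]
      -- key bounds
      have hkeys : ∀ p ∈ pairs, 0 ≤ p.1 ∧ p.1 < numRows := by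
        intro p hp
        rw [hpairs] at hp
        rcases List.mem_map.mp hp with ⟨ic, _, hic⟩
        have hkpos : (0 : Int) < 2 * numRows - 2 := by omega
        have h0 := PySem.Int.mod_nonneg ic.1 hkpos
        have hlt := PySem.Int.mod_lt ic.1 hkpos
        subst hic
        constructor <;> simp <;> omega
      -- compare the two row tables pointwise
      apply List.ext_getElem
      · rw [fold_set_length]
        simp
      · intro j hj1 hj2
        have hjlen : j < ((PySem.List.pyRange 0 numRows 1).map (fun _ => ([] : List Char))).length := by
          rw [fold_set_length] at hj1; exact hj1
        have hjN : (j : Int) < numRows := by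
          simp [PySem.List.length_pyRange_one] at hjlen
          omega
        have hA : (pairs.foldl (fun rows p => rows.set p.1.toNat (rows.getD p.1.toNat [] ++ [p.2]))
              ((PySem.List.pyRange 0 numRows 1).map (fun _ => ([] : List Char))))[j]
            = (pairs.filter (fun p => p.1 == (j : Int))).map (·.2) := by
          rw [← List.getD_eq_getElem _ [] hj1]
          rw [fold_set_getD pairs _ j
              (by
                intro p hp
                have := hkeys p hp
                simp [PySem.List.length_pyRange_one]
                omega)
              hjlen]
          have h0 : ((PySem.List.pyRange 0 numRows 1).map (fun _ => ([] : List Char))).getD j [] = ([] : List Char) := by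
            rw [List.getD_eq_getElem _ [] hjlen]
            simp
          rw [h0, List.nil_append]
        have hB : ((PySem.List.pyRange 0 numRows 1).map
              (fun r => (pairs.foldl (fun d p => d.modify p.1 [] (· ++ [p.2])) PySem.Dict.empty).getD r []))[j]
            = (pairs.filter (fun p => p.1 == (j : Int))).map (·.2) := by
          rw [List.getElem_map]
          rw [PySem.List.getElem_pyRange_one]
          have : (0 : Int) + (j : Int) = ((j : Nat) : Int) := by omega
          rw [this]
          rw [PySem.Dict.getD_foldl_modify_append]
          simp
        rw [hA, hB]
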